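-- pv_equiv track=rewrite | github.com/CTU-IIG/tt-gpu | experiments/prem-2dconvolution/showjitter.py | getBlockIntervals
-- ===== SOURCE A (Python) =====
-- def getBlockIntervalsOfKernel(blockTimes):
--     # Split into start end times
--     start_times = []
--     stop_times = []
--     for i in range(len(blockTimes)):
--         if (i%2) == 0:
--             start_times.append(blockTimes[i])
--         else:
--             stop_times.append(blockTimes[i])
--
--     intervals = []
--     for start,stop in zip(start_times, stop_times):
--         intervals.append(stop-start)
--
--     return intervals
--
-- def getBlockIntervals(nofKernel, nofBlocks, blockTimes, nofRepetitions=1):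
--     intervalsKernel = []
--     for kernel in range(0,nofKernel):
--         # Get time subset of this blocks
--         startindex = nofBlocks*kernel*nofRepetitions
--         # Take only the first repetitions of blocktimes
--         times = blockTimes[2*startindex:2*startindex+2*nofBlocks*nofRepetitions]
--
--         # Retrive the blocks of the kernel
--         intervals = getBlockIntervalsOfKernel(times)
--         intervalsKernel.append(intervals)
--     return intervalsKernel
-- ===== SOURCE B (Python) =====
-- def getBlockIntervals(nofKernel, nofBlocks, blockTimes, nofRepetitions=1):
--     # One pass over blockTimes pairing elements (start, stop) to a flat list of
--     # interval durations, then group it into nofKernel chunks of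
--     # nofBlocks*nofRepetitions intervals each.
--     it = iter(blockTimes)
--     diffs = [stop - start for start, stop in zip(it, it)]
--     m = nofBlocks * nofRepetitions
--     return [diffs[m * k : m * (k + 1)] for k in range(nofKernel)]
-- ===== Notes on version B (the rewrite author's own statement) =====
-- stated objective: simpler
-- what changed: B replaces A's per-kernel even/odd index split plus zip with one flat pairwise-difference pass over blockTimes, then chunks that flat interval list into nofKernel slices of nofBlocks*nofRepetitions intervals each.
import Mathlib
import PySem

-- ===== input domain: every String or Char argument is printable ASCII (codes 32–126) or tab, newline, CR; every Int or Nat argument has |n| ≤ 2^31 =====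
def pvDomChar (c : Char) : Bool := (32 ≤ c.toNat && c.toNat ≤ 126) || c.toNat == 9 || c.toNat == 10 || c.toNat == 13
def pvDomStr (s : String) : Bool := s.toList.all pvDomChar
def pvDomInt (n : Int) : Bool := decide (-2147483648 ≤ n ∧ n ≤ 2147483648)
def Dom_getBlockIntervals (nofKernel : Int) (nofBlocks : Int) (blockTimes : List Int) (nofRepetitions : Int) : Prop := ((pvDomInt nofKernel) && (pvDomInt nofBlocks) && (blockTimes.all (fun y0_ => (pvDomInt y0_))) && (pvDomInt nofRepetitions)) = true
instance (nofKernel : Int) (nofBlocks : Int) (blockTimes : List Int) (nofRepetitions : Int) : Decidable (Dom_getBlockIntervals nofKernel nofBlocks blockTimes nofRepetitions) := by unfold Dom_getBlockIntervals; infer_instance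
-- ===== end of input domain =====

-- B replaces A's per-kernel slice → even/odd split → zip by ONE flat pairwise-difference
-- pass over blockTimes followed by chunking that flat list (objective: simpler decomposition).

-- ===== PORT A =====
-- helper getBlockIntervalsOfKernel: index loop splitting into start/stop lists, then zip-diff loop
def getBlockIntervalsOfKernel (blockTimes : List Int) : List Int :=
  let pr := (PySem.List.pyRange 0 (blockTimes.length : Int) 1).foldl
    (fun (p : List Int × List Int) i =>
      if PySem.Int.mod i 2 = 0 then (p.1 ++ [PySem.List.pyGetD blockTimes i 0], p.2)
      else (p.1, p.2 ++ [PySem.List.pyGetD blockTimes i 0])) ([], [])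
  (pr.1.zip pr.2).foldl (fun acc sp => acc ++ [sp.2 - sp.1]) []

def getBlockIntervals (nofKernel : Int) (nofBlocks : Int) (blockTimes : List Int) (nofRepetitions : Int) : List (List Int) :=
  (PySem.List.pyRange 0 nofKernel 1).foldl (fun intervalsKernel kernel =>
    let startindex := nofBlocks * kernel * nofRepetitions
    let times := PySem.List.slice blockTimes (some (2 * startindex)) (some (2 * startindex + 2 * nofBlocks * nofRepetitions))
    intervalsKernel ++ [getBlockIntervalsOfKernel times]) []

-- ===== PORT B =====
-- diffs = [stop - start for start, stop in zip(it, it)]  (consume the list two at a time)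
def pairDiffs : List Int → List Int
  | start :: stop :: rest => (stop - start) :: pairDiffs rest
  | [_] => []
  | [] => []

def getBlockIntervals_alt (nofKernel : Int) (nofBlocks : Int) (blockTimes : List Int) (nofRepetitions : Int) : List (List Int) :=
  let diffs := pairDiffs blockTimes
  let m := nofBlocks * nofRepetitions
  (PySem.List.pyRange 0 nofKernel 1).map (fun k => PySem.List.slice diffs (some (m * k)) (some (m * (k + 1))))

-- ===== PRECONDITION & SPEC =====
def Spec_getBlockIntervals (nofKernel : Int) (nofBlocks : Int) (blockTimes : List Int) (nofRepetitions : Int) (out : List (List Int)) : Prop := out = getBlockIntervals_alt nofKernel nofBlocks blockTimes nofRepetitions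
instance (nofKernel : Int) (nofBlocks : Int) (blockTimes : List Int) (nofRepetitions : Int) (out : List (List Int)) : Decidable (Spec_getBlockIntervals nofKernel nofBlocks blockTimes nofRepetitions out) := by unfold Spec_getBlockIntervals; infer_instance

-- ===== CLAIM (what is proved, stated in full; the proofs are below) =====
def Claim_equal_getBlockIntervals : Prop := ∀ (nofKernel : Int) (nofBlocks : Int) (blockTimes : List Int) (nofRepetitions : Int), Dom_getBlockIntervals nofKernel nofBlocks blockTimes nofRepetitions → Spec_getBlockIntervals nofKernel nofBlocks blockTimes nofRepetitions (getBlockIntervals nofKernel nofBlocks blockTimes nofRepetitions)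

-- ===== LEMMAS AND PROOFS =====

-- the even- and odd-indexed elements of a list (what A's split loop collects)
def evens : List Int → List Int
  | a :: _ :: r => a :: evens r
  | [a] => [a]
  | [] => []

def odds : List Int → List Int
  | _ :: b :: r => b :: odds r
  | [_] => []
  | [] => []

lemma pairDiffs_nil : pairDiffs [] = [] := rfl
lemma pairDiffs_one (x : Int) : pairDiffs [x] = [] := rfl
lemma pairDiffs_cons (a b : Int) (r : List Int) : pairDiffs (a :: b :: r) = (b - a) :: pairDiffs r := rfl

-- reindex a fold over range(a+2, b+2) to a fold over range(a, b)
lemma foldl_pyRange_shift2 {α : Type} (g : α → Int → α) (init : α) (a b : Int) :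
    (PySem.List.pyRange (a + 2) (b + 2) 1).foldl g init
      = (PySem.List.pyRange a b 1).foldl (fun s i => g s (i + 2)) init := by
  rw [PySem.List.pyRange_one, PySem.List.pyRange_one, List.foldl_map, List.foldl_map]
  have h : (b + 2 - (a + 2)).toNat = (b - a).toNat := by omega
  rw [h]
  have hf : (fun (s : α) (k : Nat) => g s (a + 2 + (k : Int)))
      = fun (s : α) (k : Nat) => g s (a + (k : Int) + 2) := by
    funext s k; congr 1; ring
  rw [hf]

-- A's split loop computes the even- and odd-indexed sublists
lemma splitFold (bt : List Int) : ∀ s t : List Int,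
    (PySem.List.pyRange 0 (bt.length : Int) 1).foldl
      (fun (p : List Int × List Int) i =>
        if PySem.Int.mod i 2 = 0 then (p.1 ++ [PySem.List.pyGetD bt i 0], p.2)
        else (p.1, p.2 ++ [PySem.List.pyGetD bt i 0])) (s, t)
      = (s ++ evens bt, t ++ odds bt) := by
  induction bt using pairDiffs.induct with
  | case1 a b r ih =>
    intro s t
    have hlen : (((a :: b :: r).length : Nat) : Int) = (r.length : Int) + 2 := by
      simp; ring
    rw [hlen, PySem.List.pyRange_one_cons (by omega), PySem.List.pyRange_one_cons (by omega)]
    simp only [List.foldl_cons]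
    have g0 : PySem.List.pyGetD (a :: b :: r) 0 0 = a := by
      simp [PySem.List.pyGetD_zero_cons]
    have g1 : PySem.List.pyGetD (a :: b :: r) (0 + 1) 0 = b := by
      have h : ((0 : Int) + 1) = ((1 : Nat) : Int) := by norm_num
      rw [h, PySem.List.pyGetD_natCast]
      rfl
    have c0 := eq_true (show PySem.Int.mod 0 2 = 0 by decide)
    have c1 := eq_false (show ¬ PySem.Int.mod (0 + 1) 2 = 0 by decide)
    simp only [c0, c1, if_true, if_false, g0, g1]
    have hsh : (0 : Int) + 1 + 1 = 0 + 2 := by ring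
    rw [hsh, foldl_pyRange_shift2]
    show (PySem.List.pyRange 0 (r.length : Int) 1).foldl
      (fun (p : List Int × List Int) i =>
        if PySem.Int.mod (i + 2) 2 = 0 then (p.1 ++ [PySem.List.pyGetD (a :: b :: r) (i + 2) 0], p.2)
        else (p.1, p.2 ++ [PySem.List.pyGetD (a :: b :: r) (i + 2) 0])) (s ++ [a], t ++ [b])
      = (s ++ evens (a :: b :: r), t ++ odds (a :: b :: r))
    rw [PySem.List.foldl_congr_mem (PySem.List.pyRange 0 (r.length : Int) 1)
      (fun (p : List Int × List Int) i =>
        if PySem.Int.mod (i + 2) 2 = 0 then (p.1 ++ [PySem.List.pyGetD (a :: b :: r) (i + 2) 0], p.2)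
        else (p.1, p.2 ++ [PySem.List.pyGetD (a :: b :: r) (i + 2) 0]))
      (fun (p : List Int × List Int) i =>
        if PySem.Int.mod i 2 = 0 then (p.1 ++ [PySem.List.pyGetD r i 0], p.2)
        else (p.1, p.2 ++ [PySem.List.pyGetD r i 0]))
      (s ++ [a], t ++ [b])
      (by
        intro acc x hx
        have hx' := (PySem.List.mem_pyRange_one.mp hx).1
        obtain ⟨k, rfl⟩ := Int.eq_ofNat_of_zero_le hx'
        have hm : PySem.Int.mod ((k : Int) + 2) 2 = PySem.Int.mod (k : Int) 2 := by
          rw [PySem.Int.mod_eq_emod_of_pos (show (0:Int) < 2 by omega),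
              PySem.Int.mod_eq_emod_of_pos (show (0:Int) < 2 by omega)]
          omega
        have hg : PySem.List.pyGetD (a :: b :: r) ((k : Int) + 2) 0 = PySem.List.pyGetD r (k : Int) 0 := by
          have h2 : ((k : Int) + 2) = ((k + 2 : Nat) : Int) := by push_cast; ring
          rw [h2, PySem.List.pyGetD_natCast, PySem.List.pyGetD_natCast]
          simp [List.getD]
        simp only [hm, hg])]
    rw [ih (s ++ [a]) (t ++ [b])]
    simp [evens, odds]
  | case2 a =>
    intro s t
    have hlen : ((([a] : List Int).length : Nat) : Int) = 1 := by simp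
    rw [hlen, PySem.List.pyRange_one_cons (by omega), PySem.List.pyRange_one_eq_nil (by omega)]
    have g0 : PySem.List.pyGetD [a] 0 0 = a := by
      simp [PySem.List.pyGetD_zero_cons]
    simp only [List.foldl_cons, List.foldl_nil]
    have c0 := eq_true (show PySem.Int.mod 0 2 = 0 by decide)
    simp only [c0, if_true, g0]
    simp [evens, odds]
  | case3 =>
    intro s t
    simp [evens, odds]

-- zipping the even list against the odd list and subtracting is pairDiffs
lemma zip_evens_odds (bt : List Int) :
    ((evens bt).zip (odds bt)).map (fun sp => sp.2 - sp.1) = pairDiffs bt := by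
  induction bt using pairDiffs.induct with
  | case1 a b r ih => simp [evens, odds, pairDiffs_cons, ih]
  | case2 a => simp [evens, odds, pairDiffs_one]
  | case3 => simp [evens, odds, pairDiffs_nil]

-- A's helper equals B's flat pairwise-difference pass
lemma helper_eq_pairDiffs (bt : List Int) : getBlockIntervalsOfKernel bt = pairDiffs bt := by
  unfold getBlockIntervalsOfKernel
  rw [splitFold bt [] []]
  simp only [List.nil_append]
  rw [PySem.List.foldl_append_singleton_eq_map, List.nil_append, zip_evens_odds]

lemma pairDiffs_drop (A : Nat) : ∀ bt : List Int, pairDiffs (bt.drop (2 * A)) = (pairDiffs bt).drop A := by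
  induction A with
  | zero => intro bt; simp
  | succ n ih =>
    intro bt
    match bt with
    | [] => simp [pairDiffs_nil]
    | [a] =>
      have h1 : List.drop (2 * (n + 1)) [a] = ([] : List Int) := List.drop_eq_nil_of_le (by simp; omega)
      rw [h1]
      simp [pairDiffs_nil, pairDiffs_one]
    | a :: b :: r =>
      have h2 : 2 * (n + 1) = 2 * n + 1 + 1 := by omega
      rw [h2, List.drop_succ_cons, List.drop_succ_cons]
      rw [pairDiffs_cons, List.drop_succ_cons, ih r]

lemma pairDiffs_take : ∀ (bt : List Int) (q : Nat), pairDiffs (bt.take q) = (pairDiffs bt).take (q / 2) := by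
  intro bt
  induction bt using pairDiffs.induct with
  | case1 a b r ih =>
    intro q
    match q with
    | 0 => simp [pairDiffs_nil]
    | 1 => simp [pairDiffs_one, pairDiffs_cons]
    | (n + 2) =>
      have hd : (n + 2) / 2 = n / 2 + 1 := by omega
      simp [pairDiffs_cons, hd, ih n]
  | case2 a =>
    intro q
    match q with
    | 0 => simp [pairDiffs_nil]
    | (n + 1) => simp [pairDiffs_one]
  | case3 => intro q; simp [pairDiffs_nil]

lemma length_pairDiffs : ∀ bt : List Int, (pairDiffs bt).length = bt.length / 2 := by
  intro bt
  induction bt using pairDiffs.induct with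
  | case1 a b r ih => simp [pairDiffs_cons, ih]; omega
  | case2 a => simp [pairDiffs_one]
  | case3 => simp [pairDiffs_nil]

-- a Python slice with negative start and stop ≤ start is empty
lemma slice_empty_of_neg {α : Type} (xs : List α) (a b : Int) (ha : a < 0) (hba : b ≤ a) :
    PySem.List.slice xs (some a) (some b) = [] := by
  have h : PySem.List.clampIdx xs.length b ≤ PySem.List.clampIdx xs.length a := by
    unfold PySem.List.clampIdx; split_ifs <;> omega
  simp [PySem.List.slice, Nat.sub_eq_zero_of_le h]

-- per-kernel agreement: A's pairwise pass over the kernel's time slice equals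
-- the corresponding slice of the flat interval list
lemma perKernel (bt : List Int) (m k : Int) (hk : 0 ≤ k) :
    pairDiffs (PySem.List.slice bt (some (2 * (m * k))) (some (2 * (m * k) + 2 * m)))
      = PySem.List.slice (pairDiffs bt) (some (m * k)) (some (m * (k + 1))) := by
  rcases lt_trichotomy m 0 with hm | hm | hm
  · -- m < 0
    rcases eq_or_lt_of_le hk with hk0 | hk1
    · -- k = 0 : slice bt[0 : 2m] with 2m < 0
      subst hk0
      simp only [mul_zero, zero_add, mul_one]
      rw [PySem.List.slice_zero_start, PySem.List.slice_zero_start]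
      have hK : m = -(((-m).toNat : Nat) : Int) := by omega
      have hK0 : 0 < (-m).toNat := by omega
      rw [hK]
      have h2K : 2 * -((((-m).toNat : Nat)) : Int) = -(((2 * (-m).toNat : Nat)) : Int) := by
        push_cast; ring
      rw [h2K, PySem.List.slice_to_neg_natCast _ _ (by omega),
          PySem.List.slice_to_neg_natCast _ _ hK0]
      rw [pairDiffs_take, length_pairDiffs]
      congr 1
      omega
    · -- k ≥ 1 : start < 0 and stop ≤ start on both sides
      have hmk : m * k ≤ m := by
        calc m * k ≤ m * 1 := by
              apply mul_le_mul_of_nonpos_left (by omega) (le_of_lt hm)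
          _ = m := by ring
      rw [slice_empty_of_neg _ _ _ (by omega) (by omega)]
      rw [slice_empty_of_neg _ _ _ (by nlinarith) (by nlinarith)]
      simp [pairDiffs_nil]
  · -- m = 0
    subst hm
    simp only [zero_mul, mul_zero, add_zero]
    rw [PySem.List.slice_toNat bt (by omega) (by omega),
        PySem.List.slice_toNat (pairDiffs bt) (by omega) (by omega)]
    simp [pairDiffs_nil]
  · -- m > 0 : everything is a nonnegative index
    have ha : 0 ≤ m * k := mul_nonneg (by omega) hk
    have hexp : m * (k + 1) = m * k + m := by ring
    rw [hexp]
    rw [PySem.List.slice_toNat bt (by omega) (by omega),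
        PySem.List.slice_toNat (pairDiffs bt) (by omega) (by omega)]
    have e1 : (2 * (m * k)).toNat = 2 * (m * k).toNat := by omega
    have e2 : (2 * (m * k) + 2 * m).toNat - (2 * (m * k)).toNat = 2 * m.toNat := by omega
    have e3 : (m * k + m).toNat - (m * k).toNat = m.toNat := by omega
    rw [e2, e1, e3, pairDiffs_take, pairDiffs_drop]
    congr 1
    omega

-- ===== VERDICT (by name: the statement is the Claim_ definition above) =====
theorem getBlockIntervals_spec : Claim_equal_getBlockIntervals := by
  intro nofKernel nofBlocks blockTimes nofRepetitions _
  unfold Spec_getBlockIntervals getBlockIntervals getBlockIntervals_alt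
  simp only []
  rw [PySem.List.foldl_append_singleton_eq_map, List.nil_append]
  apply List.map_congr_left
  intro k hk
  have hk0 : 0 ≤ k := (PySem.List.mem_pyRange_one.mp hk).1
  rw [helper_eq_pairDiffs]
  have h2 : 2 * (nofBlocks * k * nofRepetitions) + 2 * nofBlocks * nofRepetitions
      = 2 * (nofBlocks * nofRepetitions * k) + 2 * (nofBlocks * nofRepetitions) := by ring
  have h1 : nofBlocks * k * nofRepetitions = nofBlocks * nofRepetitions * k := by ring
  rw [h2, h1, perKernel blockTimes (nofBlocks * nofRepetitions) k hk0]
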